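-- pv_equiv track=rewrite | github.com/ThomasAckermann/clip_maker | training/dataset.py | _background_candidates
-- ===== SOURCE A (Python) =====
-- def _background_candidates(
--     num_frames: int,
--     event_frames: list[int],
--     clip_len: int,
-- ) -> list[int]:
--     """
--     Return valid center frames for background clips — at least clip_len frames
--     away from every event and at least clip_len//2 from either end of the rally.
--     """
--     margin = clip_len  # exclusion zone around each event
--     half = clip_len // 2
--
--     # Build a set of excluded frames
--     excluded: set[int] = set()
--     for ef in event_frames:
--         for f in range(ef - margin, ef + margin + 1):
--             excluded.add(f)
--
--     candidates = [
--         f for f in range(half, num_frames - half)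
--         if f not in excluded
--     ]
--     return candidates
-- ===== SOURCE B (Python) =====
-- def _background_candidates(
--     num_frames: int,
--     event_frames: list[int],
--     clip_len: int,
-- ) -> list[int]:
--     half = clip_len // 2
--     hi = num_frames - half
--     out: list[int] = []
--     cur = half
--     for ef in sorted(event_frames):
--         if cur >= hi:
--             break
--         a, b = ef - clip_len, ef + clip_len
--         if b < a or b < cur:
--             continue
--         if a > cur:
--             out.extend(range(cur, min(a, hi)))
--         cur = b + 1
--     out.extend(range(cur, hi))
--     return out
-- ===== Notes on version B (the rewrite author's own statement) =====
-- stated objective: faster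
-- what changed: Instead of materialising a set of every excluded frame (one entry per frame per event) and filtering the whole candidate range against it, B sorts the events and does a single interval sweep that emits the uncovered gap ranges directly.
import Mathlib
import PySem

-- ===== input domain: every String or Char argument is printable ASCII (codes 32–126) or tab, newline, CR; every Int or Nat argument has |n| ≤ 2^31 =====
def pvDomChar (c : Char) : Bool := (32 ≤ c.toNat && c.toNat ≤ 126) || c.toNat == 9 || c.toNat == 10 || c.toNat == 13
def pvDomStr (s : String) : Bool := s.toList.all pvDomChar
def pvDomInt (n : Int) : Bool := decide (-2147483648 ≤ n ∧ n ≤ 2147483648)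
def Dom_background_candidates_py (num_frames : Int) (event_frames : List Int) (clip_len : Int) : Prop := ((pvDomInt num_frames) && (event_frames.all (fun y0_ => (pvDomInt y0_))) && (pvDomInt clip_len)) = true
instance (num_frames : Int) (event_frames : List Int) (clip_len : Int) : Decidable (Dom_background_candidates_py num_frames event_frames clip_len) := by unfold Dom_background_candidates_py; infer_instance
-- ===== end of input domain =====

-- B replaces A's per-frame exclusion set by a sorted-events interval sweep that emits the
-- uncovered gaps directly (objective: faster).

-- ===== PORT A =====
def background_candidates_py (num_frames : Int) (event_frames : List Int) (clip_len : Int) : List Int :=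
  let margin := clip_len
  let half := PySem.Int.floordiv clip_len 2
  -- Python's 'excluded' set is consumed only by membership tests; it is ported as Std.HashSet
  -- (exact as a finite set of Ints; the list-backed PySem.Set would be quadratic to build)
  let excluded : Std.HashSet Int :=
    event_frames.foldl
      (fun s ef => (PySem.List.pyRange (ef - margin) (ef + margin + 1) 1).foldl
        (fun s f => s.insert f) s)
      ∅
  (PySem.List.pyRange half (num_frames - half) 1).filter
    (fun f => !(excluded.contains f))

-- ===== PORT B =====
-- the sweep loop of Source B: cur = next still-eligible frame, out = gap frames emitted so far
def bgSweep (hi clip_len : Int) (evs : List Int) (cur : Int) (out : List Int) : List Int :=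
  match evs with
  | [] => out ++ PySem.List.pyRange cur hi 1
  | ef :: rest =>
    if hi ≤ cur then out
    else
      let a := ef - clip_len
      let b := ef + clip_len
      if b < a ∨ b < cur then bgSweep hi clip_len rest cur out
      else if a > cur then
        bgSweep hi clip_len rest (b + 1) (out ++ PySem.List.pyRange cur (min a hi) 1)
      else bgSweep hi clip_len rest (b + 1) out

def background_candidates_py_alt (num_frames : Int) (event_frames : List Int) (clip_len : Int) : List Int :=
  let half := PySem.Int.floordiv clip_len 2
  let hi := num_frames - half
  bgSweep hi clip_len (PySem.List.sorted event_frames (fun x => x) false) half []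

-- ===== PRECONDITION & SPEC =====
def Spec_background_candidates_py (num_frames : Int) (event_frames : List Int) (clip_len : Int) (out : List Int) : Prop := out = background_candidates_py_alt num_frames event_frames clip_len
instance (num_frames : Int) (event_frames : List Int) (clip_len : Int) (out : List Int) : Decidable (Spec_background_candidates_py num_frames event_frames clip_len out) := by unfold Spec_background_candidates_py; infer_instance

-- ===== CLAIM (what is proved, stated in full; the proofs are below) =====
def Claim_equal_background_candidates_py : Prop := ∀ (num_frames : Int) (event_frames : List Int) (clip_len : Int), Dom_background_candidates_py num_frames event_frames clip_len → Spec_background_candidates_py num_frames event_frames clip_len (background_candidates_py num_frames event_frames clip_len)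

-- ===== LEMMAS AND PROOFS =====

-- Bool predicate "f lies within clip_len of some event in evs"
def covB (clip_len : Int) (evs : List Int) (f : Int) : Bool :=
  evs.any (fun ef => decide (ef - clip_len ≤ f ∧ f ≤ ef + clip_len))

lemma mem_foldl_insert (l : List Int) (x : Int) : ∀ s : Std.HashSet Int,
    x ∈ l.foldl (fun s f => s.insert f) s ↔ x ∈ s ∨ x ∈ l := by
  induction l with
  | nil => simp
  | cons y t ih =>
    intro s
    simp only [List.foldl_cons, ih, Std.HashSet.mem_insert, List.mem_cons, beq_iff_eq]
    tauto

-- membership in A's exclusion set is exactly coverage by some event interval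
lemma mem_excluded (event_frames : List Int) (cl x : Int) : ∀ s : Std.HashSet Int,
    x ∈ event_frames.foldl
      (fun s ef => (PySem.List.pyRange (ef - cl) (ef + cl + 1) 1).foldl (fun s f => s.insert f) s) s
    ↔ x ∈ s ∨ ∃ ef ∈ event_frames, ef - cl ≤ x ∧ x ≤ ef + cl := by
  induction event_frames with
  | nil => simp
  | cons e t ih =>
    intro s
    simp only [List.foldl_cons]
    rw [ih, mem_foldl_insert]
    simp only [PySem.List.mem_pyRange_one, List.mem_cons]
    constructor
    · rintro ((hs | ⟨h1, h2⟩) | ⟨ef, hef, h1, h2⟩)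
      · exact Or.inl hs
      · exact Or.inr ⟨e, Or.inl rfl, by omega⟩
      · exact Or.inr ⟨ef, Or.inr hef, h1, h2⟩
    · rintro (hs | ⟨ef, (rfl | hef), h1, h2⟩)
      · exact Or.inl (Or.inl hs)
      · exact Or.inl (Or.inr (by omega))
      · exact Or.inr ⟨ef, hef, h1, h2⟩

lemma covB_cons_of_out (cl ef f : Int) (rest : List Int)
    (h : ¬ (ef - cl ≤ f ∧ f ≤ ef + cl)) : covB cl (ef :: rest) f = covB cl rest f := by
  simp only [covB, List.any_cons, decide_eq_false h, Bool.false_or]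

-- dropping the head interval: frames up to ef + clip_len are covered by it, later ones are not
lemma filter_cov_head (cl ef c hi : Int) (rest : List Int) (ha : ef - cl ≤ c) :
    (PySem.List.pyRange c hi 1).filter (fun f => !covB cl (ef :: rest) f)
    = (PySem.List.pyRange (max c (ef + cl + 1)) hi 1).filter (fun f => !covB cl rest f) := by
  by_cases hbc : ef + cl + 1 ≤ c
  · rw [max_eq_left hbc]
    apply List.filter_congr
    intro f hf
    rw [PySem.List.mem_pyRange_one] at hf
    rw [covB_cons_of_out cl ef f rest (by omega)]
  · by_cases hch : hi ≤ c
    · rw [PySem.List.pyRange_one_eq_nil hch,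
        PySem.List.pyRange_one_eq_nil (le_trans hch (le_max_left _ _))]
      rfl
    · have hcm : c ≤ min (ef + cl + 1) hi := by omega
      have hmh : min (ef + cl + 1) hi ≤ hi := min_le_right _ _
      rw [PySem.List.pyRange_one_append c (min (ef + cl + 1) hi) hi hcm hmh, List.filter_append]
      have h1 : (PySem.List.pyRange c (min (ef + cl + 1) hi) 1).filter
          (fun f => !covB cl (ef :: rest) f) = [] := by
        rw [List.filter_eq_nil_iff]
        intro f hf
        rw [PySem.List.mem_pyRange_one] at hf
        have hc : covB cl (ef :: rest) f = true := by
          simp only [covB, List.any_cons, Bool.or_eq_true, decide_eq_true_eq]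
          exact Or.inl (by omega)
        simp [hc]
      rw [h1, List.nil_append]
      by_cases hbh : ef + cl + 1 ≤ hi
      · rw [min_eq_left hbh, max_eq_right (by omega : c ≤ ef + cl + 1)]
        apply List.filter_congr
        intro f hf
        rw [PySem.List.mem_pyRange_one] at hf
        rw [covB_cons_of_out cl ef f rest (by omega)]
      · rw [min_eq_right (by omega : hi ≤ ef + cl + 1), PySem.List.pyRange_one_eq_nil (le_refl hi),
          PySem.List.pyRange_one_eq_nil (le_trans (by omega : hi ≤ ef + cl + 1) (le_max_right _ _))]
        rfl

-- loop invariant of the sweep: on a sorted event list it appends exactly the uncovered frames of [cur, hi)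
lemma bgSweep_spec (hi cl : Int) (evs : List Int)
    (hsort : evs.Pairwise (· ≤ ·)) :
    ∀ (cur : Int) (out : List Int),
    bgSweep hi cl evs cur out
      = out ++ (PySem.List.pyRange cur hi 1).filter (fun f => !covB cl evs f) := by
  induction evs with
  | nil =>
    intro cur out
    simp [bgSweep, covB]
  | cons ef rest ih =>
    rw [List.pairwise_cons] at hsort
    obtain ⟨hle, hrest⟩ := hsort
    intro cur out
    simp only [bgSweep]
    by_cases h1 : hi ≤ cur
    · rw [if_pos h1, PySem.List.pyRange_one_eq_nil h1]
      simp
    · rw [if_neg h1]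
      by_cases h2 : ef + cl < ef - cl ∨ ef + cl < cur
      · rw [if_pos h2, ih hrest]
        congr 1
        apply Eq.symm
        apply List.filter_congr
        intro f hf
        rw [PySem.List.mem_pyRange_one] at hf
        rw [covB_cons_of_out cl ef f rest (by omega)]
      · rw [if_neg h2]
        simp only [not_or, not_lt] at h2
        by_cases h3 : ef - cl > cur
        · rw [if_pos h3, ih hrest, List.append_assoc]
          congr 1
          have hcm : cur ≤ min (ef - cl) hi := by omega
          have hmh : min (ef - cl) hi ≤ hi := min_le_right _ _
          rw [PySem.List.pyRange_one_append cur (min (ef - cl) hi) hi hcm hmh, List.filter_append]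
          have hseg1 : (PySem.List.pyRange cur (min (ef - cl) hi) 1).filter
              (fun f => !covB cl (ef :: rest) f) = PySem.List.pyRange cur (min (ef - cl) hi) 1 := by
            rw [List.filter_eq_self]
            intro f hf
            rw [PySem.List.mem_pyRange_one] at hf
            have hc : covB cl (ef :: rest) f = false := by
              simp only [covB, List.any_eq_false, List.mem_cons, decide_eq_true_eq]
              rintro x (rfl | hx)
              · omega
              · have := hle x hx; omega
            simp [hc]
          rw [hseg1]
          congr 1
          by_cases h4 : ef - cl ≤ hi
          · rw [min_eq_left h4, filter_cov_head cl ef (ef - cl) hi rest le_rfl,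
              max_eq_right (by omega : ef - cl ≤ ef + cl + 1)]
          · rw [min_eq_right (by omega : hi ≤ ef - cl), PySem.List.pyRange_one_eq_nil (le_refl hi),
              PySem.List.pyRange_one_eq_nil (by omega : hi ≤ ef + cl + 1)]
            rfl
        · rw [if_neg h3, ih hrest]
          congr 1
          rw [filter_cov_head cl ef cur hi rest (by omega),
            max_eq_right (by omega : cur ≤ ef + cl + 1)]

-- ===== VERDICT (by name: the statement is the Claim_ definition above) =====
theorem background_candidates_py_spec : Claim_equal_background_candidates_py := by
  intro num_frames event_frames clip_len _
  unfold Spec_background_candidates_py background_candidates_py background_candidates_py_alt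
  have hsort : (PySem.List.sorted event_frames (fun x => x) false).Pairwise (· ≤ ·) :=
    PySem.List.sorted_pairwise event_frames (fun x => x)
  rw [bgSweep_spec _ _ _ hsort, List.nil_append]
  apply List.filter_congr
  intro f _
  rw [Bool.eq_iff_iff]
  simp only [Bool.not_eq_true', ← Bool.not_eq_true]
  apply not_congr
  rw [Std.HashSet.contains_iff_mem, mem_excluded, covB, List.any_eq_true]
  simp only [PySem.List.mem_sorted, decide_eq_true_eq]
  constructor
  · rintro (h | h)
    · exact absurd h (by simp)
    · exact h
  · exact Or.inr
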